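-- pv_equiv track=rewrite | github.com/yuhui-zh15/nlg_metrics | nlg_metrics/factscore/fact_extractor.py | get_triples
-- ===== SOURCE A (Python) =====
-- def get_triples(extractions):
--     triples = []
--     for extraction in extractions:
--         args = extraction.split('\t')
--         s, r, t = None, None, None
--         for arg in args:
--             if arg.startswith('ARG0:'): s = arg.split(':', 1)[1]
--             if arg.startswith('V:'): r = arg.split(':', 1)[1]
--             if arg.startswith('ARG1:'): t = arg.split(':', 1)[1]
--         triples.append([s, r, t])
--     return triples
-- ===== SOURCE B (Python) =====
-- def get_triples(extractions):
--     def last_value(tokens, prefix):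
--         # first match scanning from the end == last-wins of a forward scan
--         for tok in reversed(tokens):
--             if tok.startswith(prefix):
--                 return tok[len(prefix):]
--         return None
--     return [[last_value(toks, 'ARG0:'), last_value(toks, 'V:'), last_value(toks, 'ARG1:')]
--             for toks in (e.split('\t') for e in extractions)]
-- ===== Notes on version B (the rewrite author's own statement) =====
-- stated objective: alternative
-- what changed: B replaces A's single forward pass with three role accumulators by three staged early-exit scans over the reversed token list (first match from the end = A's last-wins), taking the value as a length-based suffix slice instead of split(':',1).
import Mathlib
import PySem

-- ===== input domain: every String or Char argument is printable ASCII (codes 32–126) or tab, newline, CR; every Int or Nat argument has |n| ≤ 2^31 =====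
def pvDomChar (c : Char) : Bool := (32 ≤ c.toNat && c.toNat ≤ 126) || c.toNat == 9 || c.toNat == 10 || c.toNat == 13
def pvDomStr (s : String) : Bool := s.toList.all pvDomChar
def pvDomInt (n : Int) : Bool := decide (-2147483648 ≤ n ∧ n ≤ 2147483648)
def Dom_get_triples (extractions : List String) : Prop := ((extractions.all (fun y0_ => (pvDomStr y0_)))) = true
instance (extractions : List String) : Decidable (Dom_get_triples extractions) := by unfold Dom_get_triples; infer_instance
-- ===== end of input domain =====

-- B replaces A's single forward pass with per-role accumulators by three staged early-exit
-- scans over the reversed token list, slicing the value off by prefix length; objective: alternative.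

-- ===== PORT A =====
-- arg.split(':', 1)[1]; the index 1 is always present under A's startswith guards, so IndexError is unreachable
def pvArgVal (arg : String) : Option String :=
  PySem.List.pyGet? ((PySem.Str.splitMax? arg ":" 1).getD []) 1

-- one iteration of A's inner loop over (s, r, t)
def get_triples_step (st : Option String × Option String × Option String) (arg : String) :
    Option String × Option String × Option String :=
  let st1 := if PySem.Str.startswith arg "ARG0:" then (pvArgVal arg, st.2.1, st.2.2) else st
  let st2 := if PySem.Str.startswith arg "V:" then (st1.1, pvArgVal arg, st1.2.2) else st1
  if PySem.Str.startswith arg "ARG1:" then (st2.1, st2.2.1, pvArgVal arg) else st2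

def get_triples (extractions : List String) : List (List (Option String)) :=
  extractions.foldl (fun triples extraction =>
    let args := (PySem.Str.split? extraction "\t").getD []
    let st := args.foldl get_triples_step (none, none, none)
    triples ++ [[st.1, st.2.1, st.2.2]]) []

-- ===== PORT B =====
-- for tok in reversed(tokens): if tok.startswith(prefix): return tok[len(prefix):]  /  return None
def pvLastValue (toks : List String) (p : String) : Option String :=
  match toks with
  | [] => none
  | t :: rest =>
    if PySem.Str.startswith t p then some (PySem.Str.slice t (some (PySem.Str.len p)) none)
    else pvLastValue rest p

-- [[last_value(toks,'ARG0:'), …] for toks in (e.split('\t') for e in extractions)]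
def get_triples_alt (extractions : List String) : List (List (Option String)) :=
  (extractions.map (fun e => (PySem.Str.split? e "\t").getD [])).map
    (fun toks => [pvLastValue toks.reverse "ARG0:", pvLastValue toks.reverse "V:", pvLastValue toks.reverse "ARG1:"])

-- ===== PRECONDITION & SPEC =====
def Spec_get_triples (extractions : List String) (out : List (List (Option String))) : Prop := out = get_triples_alt extractions
instance (extractions : List String) (out : List (List (Option String))) : Decidable (Spec_get_triples extractions out) := by unfold Spec_get_triples; infer_instance

-- ===== CLAIM (what is proved, stated in full; the proofs are below) =====
def Claim_equal_get_triples : Prop := ∀ (extractions : List String), Dom_get_triples extractions → Spec_get_triples extractions (get_triples extractions)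

-- ===== LEMMAS AND PROOFS =====

-- the per-role update A's loop performs
def pvUpd (p : String) (v : Option String) (a : String) : Option String :=
  if PySem.Str.startswith a p then pvArgVal a else v

lemma pv_go_zero (sep : List Char) (fuel : Nat) (l cur : List Char) (acc : List (List Char)) :
    PySem.Chars.splitOnMax.go sep fuel 0 l cur acc = ((cur.reverse ++ l) :: acc).reverse := by
  cases fuel with
  | zero => simp [PySem.Chars.splitOnMax.go]
  | succ n => cases l <;> simp [PySem.Chars.splitOnMax.go]

lemma pv_go_one (l : List Char) : ∀ (fuel : Nat) (cur : List Char) (acc : List (List Char)),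
    l.length < fuel →
    PySem.Chars.splitOnMax.go [':'] fuel 1 l cur acc =
      if (':' : Char) ∈ l then
        acc.reverse ++ [cur.reverse ++ l.takeWhile (· ≠ ':'), (l.dropWhile (· ≠ ':')).tail]
      else acc.reverse ++ [cur.reverse ++ l] := by
  induction l with
  | nil =>
    intro fuel cur acc h
    cases fuel with
    | zero => omega
    | succ n => simp [PySem.Chars.splitOnMax.go]
  | cons c rest ih =>
    intro fuel cur acc h
    cases fuel with
    | zero => omega
    | succ n =>
      by_cases hc : c = ':'
      · subst hc
        simp only [PySem.Chars.splitOnMax.go]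
        have hpre : [':'].isPrefixOf (':' :: rest) = true := by simp [List.isPrefixOf]
        simp [hpre, pv_go_zero, List.takeWhile, List.dropWhile]
      · have hpre : [':'].isPrefixOf (c :: rest) = false := by
          simp [List.isPrefixOf]; exact fun h' => hc h'.symm
        simp only [PySem.Chars.splitOnMax.go]
        rw [if_neg (by omega : ¬ (1 : Nat) = 0), hpre]
        simp only [Bool.false_eq_true, if_false]
        rw [ih n (c :: cur) acc (by simpa using Nat.lt_of_succ_lt_succ h)]
        simp [hc, Ne.symm hc]

lemma pv_split1 (cs : List Char) :
    PySem.Chars.splitOnMax cs [':'] 1 =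
      if (':' : Char) ∈ cs then [cs.takeWhile (· ≠ ':'), (cs.dropWhile (· ≠ ':')).tail]
      else [cs] := by
  unfold PySem.Chars.splitOnMax
  rw [if_neg (by omega : ¬ (1 : ℤ) < 0)]
  have : ((1 : ℤ)).toNat = 1 := rfl
  rw [this, pv_go_one cs (cs.length + 1) [] [] (by omega)]
  split_ifs <;> simp

-- string-level characterization of arg.split(':', 1)
lemma pv_splitMax_str (arg : String) :
    (PySem.Str.splitMax? arg ":" 1).getD [] =
      if (':' : Char) ∈ arg.toList then
        [String.ofList (arg.toList.takeWhile (· ≠ ':')), String.ofList ((arg.toList.dropWhile (· ≠ ':')).tail)]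
      else [arg] := by
  unfold PySem.Str.splitMax? PySem.Chars.splitMax?
  have hsep : (":" : String).toList = [':'] := by decide
  rw [hsep]
  rw [if_neg (by simp)]
  rw [pv_split1]
  split_ifs <;> simp

lemma pv_tw_dw (kcs : List Char) (rest : List Char) (hk : (':' : Char) ∉ kcs) :
    (kcs ++ ':' :: rest).takeWhile (· ≠ ':') = kcs ∧
    (kcs ++ ':' :: rest).dropWhile (· ≠ ':') = ':' :: rest := by
  induction kcs with
  | nil => simp
  | cons a k ih =>
    have ha : a ≠ ':' := fun h => hk (by simp [h])
    have hk' : (':' : Char) ∉ k := fun h => hk (by simp [h])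
    obtain ⟨h1, h2⟩ := ih hk'
    constructor
    · simpa [List.takeWhile_cons, ha] using h1
    · simpa [List.dropWhile_cons, ha] using h2

-- under A's guard, arg.split(':',1)[1] is exactly B's suffix slice arg[len(p):]
lemma pv_val_eq (a p : String) (kcs : List Char) (hk : (':' : Char) ∉ kcs)
    (hp : p.toList = kcs ++ [':']) (hsw : PySem.Str.startswith a p = true) :
    pvArgVal a = some (PySem.Str.slice a (some (PySem.Str.len p)) none) := by
  rw [PySem.Str.startswith_eq, PySem.Chars.startswith_iff, hp] at hsw
  obtain ⟨rest, hrest0⟩ := hsw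
  have hrest : a.toList = kcs ++ ':' :: rest := by rw [← hrest0]; simp
  have hmem : (':' : Char) ∈ a.toList := by rw [hrest]; simp
  obtain ⟨htw, hdw⟩ := pv_tw_dw kcs rest hk
  unfold pvArgVal
  rw [pv_splitMax_str, if_pos hmem, hrest, hdw]
  have hlen : PySem.Str.len p = ((kcs.length + 1 : Nat) : Int) := by
    unfold PySem.Str.len; rw [hp]; simp
  have hslice : PySem.Str.slice a (some (PySem.Str.len p)) none = String.ofList rest := by
    unfold PySem.Str.slice
    rw [hlen, PySem.Chars.slice_eq_listSlice, PySem.List.slice_from_natCast, ← hrest0]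
    congr 1
    have hl : (kcs ++ [':']).length = kcs.length + 1 := by simp
    rw [← hl, List.drop_left]
  rw [hslice]
  simp [PySem.List.pyGet?, PySem.List.pyIdx?]

-- A's loop body acts componentwise
lemma pv_step_comp (st : Option String × Option String × Option String) (a : String) :
    get_triples_step st a = (pvUpd "ARG0:" st.1 a, pvUpd "V:" st.2.1 a, pvUpd "ARG1:" st.2.2 a) := by
  obtain ⟨s, r, t⟩ := st
  unfold get_triples_step pvUpd
  dsimp only
  split_ifs <;> rfl

lemma pv_fold_comp (args : List String) :
    ∀ (st : Option String × Option String × Option String),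
    args.foldl get_triples_step st =
      (args.foldl (pvUpd "ARG0:") st.1, args.foldl (pvUpd "V:") st.2.1, args.foldl (pvUpd "ARG1:") st.2.2) := by
  induction args with
  | nil => intro st; rfl
  | cons a rest ih =>
    intro st
    rw [List.foldl_cons, pv_step_comp, ih]
    rfl

lemma pv_last_append (l : List String) (a : String) (p : String) :
    pvLastValue (l ++ [a]) p =
      match pvLastValue l p with
      | some v => some v
      | none => pvLastValue [a] p := by
  induction l with
  | nil => simp [pvLastValue]
  | cons t rest ih =>
    simp only [List.cons_append, pvLastValue]
    by_cases h : PySem.Str.startswith t p = true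
    · rw [if_pos h, if_pos h]
    · rw [if_neg h, if_neg h]
      exact ih

-- A's last-wins fold equals B's first-match-from-the-end scan
lemma pv_fold_eq_last (p : String) (kcs : List Char) (hk : (':' : Char) ∉ kcs)
    (hp : p.toList = kcs ++ [':']) (args : List String) :
    ∀ (init : Option String),
    args.foldl (pvUpd p) init =
      match pvLastValue args.reverse p with
      | some v => some v
      | none => init := by
  induction args with
  | nil => intro init; rfl
  | cons a rest ih =>
    intro init
    rw [List.foldl_cons, ih, List.reverse_cons, pv_last_append]
    cases hlv : pvLastValue rest.reverse p with
    | some v => rfl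
    | none =>
      simp only [pvLastValue]
      by_cases h : PySem.Str.startswith a p = true
      · rw [if_pos h, pvUpd, if_pos h, pv_val_eq a p kcs hk hp h]
      · rw [if_neg h, pvUpd, if_neg h]

lemma pv_fold_map {α β : Type} (f : α → β) : ∀ (es : List α) (acc : List β),
    es.foldl (fun t e => t ++ [f e]) acc = acc ++ es.map f := by
  intro es
  induction es with
  | nil => intro acc; simp
  | cons e rest ih => intro acc; simp [List.foldl_cons, ih]

lemma pv_role (p : String) (kcs : List Char) (hk : (':' : Char) ∉ kcs)
    (hp : p.toList = kcs ++ [':']) (args : List String) :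
    args.foldl (pvUpd p) none = pvLastValue args.reverse p := by
  rw [pv_fold_eq_last p kcs hk hp args none]
  cases pvLastValue args.reverse p <;> rfl

theorem get_triples_spec : Claim_equal_get_triples := by
  intro extractions _
  unfold Spec_get_triples get_triples get_triples_alt
  rw [pv_fold_map (fun extraction =>
        let args := (PySem.Str.split? extraction "\t").getD []
        let st := args.foldl get_triples_step (none, none, none)
        [st.1, st.2.1, st.2.2])]
  rw [List.map_map, List.nil_append]
  apply List.map_congr_left
  intro e _
  dsimp only [Function.comp]
  rw [pv_fold_comp]
  dsimp only
  rw [pv_role "ARG0:" ("ARG0".toList) (by decide) (by decide),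
      pv_role "V:" ("V".toList) (by decide) (by decide),
      pv_role "ARG1:" ("ARG1".toList) (by decide) (by decide)]
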